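-- pv_equiv track=rewrite | github.com/Les-dev-de-bot-vikidiens/MuffyBot | muffybot/tasks/daily_report.py | _short_list
-- ===== SOURCE A (Python) =====
-- def _short_list(lines: list[str], max_lines: int = 7, max_chars: int = 980) -> str:
--     if not lines:
--         return "Aucune donnée"
--     output: list[str] = []
--     current = 0
--     for line in lines[:max_lines]:
--         text = f"- {line}"
--         if current + len(text) + 1 > max_chars:
--             break
--         output.append(text)
--         current += len(text) + 1
--     return "\n".join(output) if output else "Aucune donnée"
-- ===== SOURCE B (Python) =====
-- def _short_list(lines: list[str], max_lines: int = 7, max_chars: int = 980) -> str: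
--     texts = ["- " + line for line in lines[:max_lines]]
--     cum = []
--     total = 0
--     for t in texts:
--         total += len(t) + 1
--         cum.append(total)
--     k = next((i for i, c in enumerate(cum) if c > max_chars), len(cum))
--     joined = "\n".join(texts[:k])
--     return joined if joined else "Aucune donnée"
-- ===== Notes on version B (the rewrite author's own statement) =====
-- stated objective: alternative
-- what changed: A's single interleaved accumulate-and-break loop is decomposed into: build all bullet candidates, compute the cumulative-cost table, find the first index whose cumulative cost exceeds max_chars, and join that prefix; the empty fallback tests the joined string instead of the list.
import Mathlib
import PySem

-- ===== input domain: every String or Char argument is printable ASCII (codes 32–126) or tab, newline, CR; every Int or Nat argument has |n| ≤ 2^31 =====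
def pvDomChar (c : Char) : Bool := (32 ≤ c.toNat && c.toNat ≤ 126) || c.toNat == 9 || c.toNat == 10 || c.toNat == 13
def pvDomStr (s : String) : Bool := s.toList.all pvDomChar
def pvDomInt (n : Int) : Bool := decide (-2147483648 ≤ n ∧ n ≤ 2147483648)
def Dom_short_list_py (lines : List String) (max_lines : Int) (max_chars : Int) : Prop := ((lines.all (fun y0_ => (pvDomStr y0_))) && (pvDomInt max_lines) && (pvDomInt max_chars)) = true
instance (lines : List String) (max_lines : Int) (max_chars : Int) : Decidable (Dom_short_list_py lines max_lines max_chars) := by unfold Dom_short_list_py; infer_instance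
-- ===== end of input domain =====

-- B decomposes A's interleaved accumulate-and-break loop into build-candidates /
-- cumulative-cost table / first-overflow index / join-prefix (objective: alternative).

-- ===== PORT A =====
-- the 'for line in …: text = f"- {line}"; if current+len(text)+1 > max_chars: break; append; current += …' loop
def shortLoopA (mc : Int) : List String → List String → Int → List String
  | [], out, _ => out
  | l :: rest, out, cur =>
      let text := "- " ++ l
      if cur + PySem.Str.len text + 1 > mc then out
      else shortLoopA mc rest (out ++ [text]) (cur + PySem.Str.len text + 1)

def short_list_py (lines : List String) (max_lines : Int) (max_chars : Int) : String :=
  if lines = [] then "Aucune donnée"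
  else
    let output := shortLoopA max_chars (PySem.List.slice lines none (some max_lines)) [] 0
    if output = [] then "Aucune donnée" else PySem.Str.join "\n" output

-- ===== PORT B =====
-- 'for t in texts: total += len(t) + 1; cum.append(total)'
def cumLoopB : List String → Int → List Int
  | [], _ => []
  | t :: ts, total => (total + PySem.Str.len t + 1) :: cumLoopB ts (total + PySem.Str.len t + 1)

-- 'next((i for i, c in enumerate(cum) if c > max_chars), len(cum))'
def firstOverB (mc : Int) : List Int → Nat
  | [] => 0
  | c :: cs => if c > mc then 0 else firstOverB mc cs + 1

def short_list_py_alt (lines : List String) (max_lines : Int) (max_chars : Int) : String :=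
  let texts := (PySem.List.slice lines none (some max_lines)).map (fun l => "- " ++ l)
  let cum := cumLoopB texts 0
  let k := firstOverB max_chars cum
  let joined := PySem.Str.join "\n" (texts.take k)
  if joined = "" then "Aucune donnée" else joined

-- ===== PRECONDITION & SPEC =====
def Spec_short_list_py (lines : List String) (max_lines : Int) (max_chars : Int) (out : String) : Prop := out = short_list_py_alt lines max_lines max_chars
instance (lines : List String) (max_lines : Int) (max_chars : Int) (out : String) : Decidable (Spec_short_list_py lines max_lines max_chars out) := by unfold Spec_short_list_py; infer_instance

-- ===== CLAIM (what is proved, stated in full; the proofs are below) =====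
def Claim_equal_short_list_py : Prop := ∀ (lines : List String) (max_lines : Int) (max_chars : Int), Dom_short_list_py lines max_lines max_chars → Spec_short_list_py lines max_lines max_chars (short_list_py lines max_lines max_chars)

-- ===== LEMMAS AND PROOFS =====

theorem join_nl_nil : PySem.Str.join "\n" ([] : List String) = "" := by decide

theorem join_nl_bullet_ne (l : String) (rest : List String) :
    PySem.Str.join "\n" (("- " ++ l) :: rest) ≠ "" := by
  intro h
  have h' := congrArg String.toList h
  rw [PySem.Str.toList_join] at h'
  cases rest with
  | nil => simp [PySem.Chars.join_singleton] at h'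
  | cons y ys => simp [PySem.Chars.join_cons_cons] at h'

theorem loopA_eq (mc : Int) : ∀ (ts out : List String) (cur : Int),
    shortLoopA mc ts out cur =
      out ++ (ts.map (fun l => "- " ++ l)).take
        (firstOverB mc (cumLoopB (ts.map (fun l => "- " ++ l)) cur)) := by
  intro ts
  induction ts with
  | nil => intro out cur; simp [shortLoopA, cumLoopB, firstOverB]
  | cons l ts ih =>
    intro out cur
    simp only [shortLoopA, List.map_cons, cumLoopB, firstOverB]
    split_ifs with h
    · simp
    · rw [ih]
      simp [List.take_succ_cons, List.append_assoc]

theorem short_list_py_spec : Claim_equal_short_list_py := by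
  intro lines max_lines max_chars _
  unfold Spec_short_list_py short_list_py short_list_py_alt
  by_cases hl : lines = []
  · subst hl
    simp [PySem.List.slice, cumLoopB, firstOverB, join_nl_nil]
  · simp only [hl, ite_false]
    rw [loopA_eq]
    simp only [List.nil_append]
    set ts := (PySem.List.slice lines none (some max_lines)).map (fun l => "- " ++ l) with hts
    set k := firstOverB max_chars (cumLoopB ts 0) with hk
    cases hout : ts.take k with
    | nil => simp [join_nl_nil]
    | cons x r =>
      have hx : x ∈ ts := by
        have : x ∈ ts.take k := by rw [hout]; exact List.mem_cons_self
        exact List.mem_of_mem_take this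
      obtain ⟨l, _, hxl⟩ := List.mem_map.mp (hts ▸ hx)
      have hne : PySem.Str.join "\n" (x :: r) ≠ "" := by
        rw [← hxl]; exact join_nl_bullet_ne l r
      simp [hne]
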